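-- pv_equiv track=rewrite | github.com/fadi721994/AI_assignment4 | utils.py | calc_conflicts
-- ===== SOURCE A (Python) =====
-- def calc_conflicts(checked_queen_col, board, queens_num):
--     conflicts_num = 0
--     checked_queen_row = board[checked_queen_col]
--     for current_queen_col in range(queens_num):
--         # If same queen, don't calculate conflicts
--         if current_queen_col == checked_queen_col:
--             continue
--         current_queen_row = board[current_queen_col]
--         if current_queen_row == checked_queen_row or\
--                 abs(checked_queen_row-current_queen_row) == abs(checked_queen_col-current_queen_col):
--             conflicts_num = conflicts_num + 1
--     return conflicts_num
-- ===== SOURCE B (Python) =====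
-- def calc_conflicts(checked_queen_col, board, queens_num):
--     # Group the other queens by row, diagonal and anti-diagonal in one pass,
--     # then read off the sizes of the checked queen's three groups.
--     rows = {}
--     diags = {}
--     antis = {}
--     for col in range(queens_num):
--         if col == checked_queen_col:
--             continue
--         row = board[col]
--         rows[row] = rows.get(row, 0) + 1
--         diags[row - col] = diags.get(row - col, 0) + 1
--         antis[row + col] = antis.get(row + col, 0) + 1
--     r = board[checked_queen_col]
--     c = checked_queen_col
--     return rows.get(r, 0) + diags.get(r - c, 0) + antis.get(r + c, 0)
-- ===== Notes on version B (the rewrite author's own statement) =====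
-- stated objective: alternative
-- what changed: Replaces the per-column OR-comparison against the checked queen with one grouping pass that buckets the other queens into three dicts keyed by row, row-col and row+col, returning the sizes of the checked queen's three groups; valid because the three axes are pairwise disjoint for distinct squares. Pre_ excludes only inputs where A raises IndexError (checked_queen_col outside board's index range, or queens_num > len(board)).
import Mathlib
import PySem

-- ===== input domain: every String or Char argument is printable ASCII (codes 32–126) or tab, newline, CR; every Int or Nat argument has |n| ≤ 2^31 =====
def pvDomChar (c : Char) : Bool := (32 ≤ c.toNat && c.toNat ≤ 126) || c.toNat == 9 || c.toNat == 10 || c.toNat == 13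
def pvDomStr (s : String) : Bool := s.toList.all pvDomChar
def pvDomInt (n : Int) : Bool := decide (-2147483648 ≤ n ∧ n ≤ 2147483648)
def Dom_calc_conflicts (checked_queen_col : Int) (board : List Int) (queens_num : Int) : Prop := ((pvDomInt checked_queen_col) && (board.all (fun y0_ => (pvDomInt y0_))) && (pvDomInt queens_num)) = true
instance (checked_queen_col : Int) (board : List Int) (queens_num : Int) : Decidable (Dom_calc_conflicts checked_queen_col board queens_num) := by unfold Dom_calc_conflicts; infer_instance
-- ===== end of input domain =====

-- B replaces A's per-column OR-test by one grouping pass over the other queens into three axis-keyed dicts (alternative decomposition, same cost).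

-- ===== PORT A =====
-- board[i] is ported as PySem.List.pyGetD board i 0: Pre_ guarantees every index read is in
-- Python's (negative-wrapping) range, so the default 0 is never the result; negative indices
-- agree because pyGetD implements Python's wraparound. abs(x) == abs(y) is ported as natAbs equality.
def calc_conflicts (checked_queen_col : Int) (board : List Int) (queens_num : Int) : Int :=
  let checked_queen_row := PySem.List.pyGetD board checked_queen_col 0
  (PySem.List.pyRange 0 queens_num 1).foldl
    (fun conflicts_num current_queen_col =>
      if current_queen_col = checked_queen_col then conflicts_num
      else
        let current_queen_row := PySem.List.pyGetD board current_queen_col 0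
        if current_queen_row = checked_queen_row ∨
            (checked_queen_row - current_queen_row).natAbs = (checked_queen_col - current_queen_col).natAbs
        then conflicts_num + 1 else conflicts_num) 0

-- ===== PORT B =====
def calc_conflicts_alt (checked_queen_col : Int) (board : List Int) (queens_num : Int) : Int :=
  let st := (PySem.List.pyRange 0 queens_num 1).foldl
    (fun (st : PySem.Dict Int Int × PySem.Dict Int Int × PySem.Dict Int Int) col =>
      if col = checked_queen_col then st
      else
        let row := PySem.List.pyGetD board col 0
        (st.1.insert row (st.1.getD row 0 + 1),
         st.2.1.insert (row - col) (st.2.1.getD (row - col) 0 + 1),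
         st.2.2.insert (row + col) (st.2.2.getD (row + col) 0 + 1)))
    (PySem.Dict.empty, PySem.Dict.empty, PySem.Dict.empty)
  let r := PySem.List.pyGetD board checked_queen_col 0
  let c := checked_queen_col
  st.1.getD r 0 + st.2.1.getD (r - c) 0 + st.2.2.getD (r + c) 0

-- ===== PRECONDITION & SPEC =====
-- Pre_ excludes exactly the inputs where A raises IndexError: checked_queen_col outside
-- Python's (negative-wrapping) index range of board, or queens_num exceeding len(board).
def Pre_calc_conflicts (checked_queen_col : Int) (board : List Int) (queens_num : Int) : Prop :=
  -(board.length : Int) ≤ checked_queen_col ∧ checked_queen_col < (board.length : Int) ∧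
    queens_num ≤ (board.length : Int)
instance (checked_queen_col : Int) (board : List Int) (queens_num : Int) : Decidable (Pre_calc_conflicts checked_queen_col board queens_num) := by unfold Pre_calc_conflicts; infer_instance
def pvWitness_calc_conflicts : Int × List Int × Int := (1, [0, 0, 2, 1], 4)
def Spec_calc_conflicts (checked_queen_col : Int) (board : List Int) (queens_num : Int) (out : Int) : Prop := out = calc_conflicts_alt checked_queen_col board queens_num
instance (checked_queen_col : Int) (board : List Int) (queens_num : Int) (out : Int) : Decidable (Spec_calc_conflicts checked_queen_col board queens_num out) := by unfold Spec_calc_conflicts; infer_instance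

-- ===== CLAIM (what is proved, stated in full; the proofs are below) =====
def Claim_equal_calc_conflicts : Prop := ∀ (checked_queen_col : Int) (board : List Int) (queens_num : Int), Dom_calc_conflicts checked_queen_col board queens_num → Pre_calc_conflicts checked_queen_col board queens_num → Spec_calc_conflicts checked_queen_col board queens_num (calc_conflicts checked_queen_col board queens_num)

-- ===== LEMMAS AND PROOFS =====

-- A's loop counts the columns satisfying its predicate.
theorem foldA_count (c r : Int) (board : List Int) (L : List Int) (acc : Int) :
    L.foldl
      (fun conflicts_num col =>
        if col = c then conflicts_num
        else
          let row := PySem.List.pyGetD board col 0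
          if row = r ∨ (r - row).natAbs = (c - col).natAbs
          then conflicts_num + 1 else conflicts_num) acc
    = acc + (L.countP (fun col =>
        decide (¬ col = c ∧ (PySem.List.pyGetD board col 0 = r ∨
          (r - PySem.List.pyGetD board col 0).natAbs = (c - col).natAbs))) : Int) := by
  induction L generalizing acc with
  | nil => simp
  | cons x L ih =>
    simp only [List.foldl_cons, List.countP_cons, ih]
    by_cases hx : x = c
    · simp [hx]
    · by_cases hcond : PySem.List.pyGetD board x 0 = r ∨
        (r - PySem.List.pyGetD board x 0).natAbs = (c - x).natAbs
      · simp [hx, hcond]; push_cast; ring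
      · simp [hx, hcond]

-- Each component of B's skip-self triple-dict fold is an axis counter over the other columns.
theorem foldB_getD (c : Int) (board : List Int) (L : List Int)
    (d1 d2 d3 : PySem.Dict Int Int) (v1 v2 v3 : Int) :
    (L.foldl
      (fun (st : PySem.Dict Int Int × PySem.Dict Int Int × PySem.Dict Int Int) col =>
        if col = c then st
        else
          let row := PySem.List.pyGetD board col 0
          (st.1.insert row (st.1.getD row 0 + 1),
           st.2.1.insert (row - col) (st.2.1.getD (row - col) 0 + 1),
           st.2.2.insert (row + col) (st.2.2.getD (row + col) 0 + 1)))
      (d1, d2, d3)).1.getD v1 0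
      = d1.getD v1 0 + (L.countP (fun col => decide (¬ col = c ∧ PySem.List.pyGetD board col 0 = v1)) : Int)
    ∧ (L.foldl
      (fun (st : PySem.Dict Int Int × PySem.Dict Int Int × PySem.Dict Int Int) col =>
        if col = c then st
        else
          let row := PySem.List.pyGetD board col 0
          (st.1.insert row (st.1.getD row 0 + 1),
           st.2.1.insert (row - col) (st.2.1.getD (row - col) 0 + 1),
           st.2.2.insert (row + col) (st.2.2.getD (row + col) 0 + 1)))
      (d1, d2, d3)).2.1.getD v2 0
      = d2.getD v2 0 + (L.countP (fun col => decide (¬ col = c ∧ PySem.List.pyGetD board col 0 - col = v2)) : Int)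
    ∧ (L.foldl
      (fun (st : PySem.Dict Int Int × PySem.Dict Int Int × PySem.Dict Int Int) col =>
        if col = c then st
        else
          let row := PySem.List.pyGetD board col 0
          (st.1.insert row (st.1.getD row 0 + 1),
           st.2.1.insert (row - col) (st.2.1.getD (row - col) 0 + 1),
           st.2.2.insert (row + col) (st.2.2.getD (row + col) 0 + 1)))
      (d1, d2, d3)).2.2.getD v3 0
      = d3.getD v3 0 + (L.countP (fun col => decide (¬ col = c ∧ PySem.List.pyGetD board col 0 + col = v3)) : Int) := by
  induction L generalizing d1 d2 d3 with
  | nil => simp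
  | cons x L ih =>
    simp only [List.foldl_cons, List.countP_cons]
    by_cases hx : x = c
    · obtain ⟨h1, h2, h3⟩ := ih d1 d2 d3
      simp [hx, h1, h2, h3]
    · obtain ⟨h1, h2, h3⟩ := ih
        (d1.insert (PySem.List.pyGetD board x 0) (d1.getD (PySem.List.pyGetD board x 0) 0 + 1))
        (d2.insert (PySem.List.pyGetD board x 0 - x) (d2.getD (PySem.List.pyGetD board x 0 - x) 0 + 1))
        (d3.insert (PySem.List.pyGetD board x 0 + x) (d3.getD (PySem.List.pyGetD board x 0 + x) 0 + 1))
      refine ⟨?_, ?_, ?_⟩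
      · rw [if_neg hx, h1, PySem.Dict.getD_insert]
        by_cases hv : v1 = PySem.List.pyGetD board x 0
        · simp [hx, hv]; push_cast; ring
        · simp [hx, hv, Ne.symm hv]
      · rw [if_neg hx, h2, PySem.Dict.getD_insert]
        by_cases hv : v2 = PySem.List.pyGetD board x 0 - x
        · simp [hx, hv]; push_cast; ring
        · simp [hx, hv, Ne.symm hv]
      · rw [if_neg hx, h3, PySem.Dict.getD_insert]
        by_cases hv : v3 = PySem.List.pyGetD board x 0 + x
        · simp [hx, hv]; push_cast; ring
        · simp [hx, hv, Ne.symm hv]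

-- For columns other than c the three axis predicates are pairwise exclusive and their
-- disjunction is A's OR-condition, so the three counts sum to A's count.
theorem axes_split (c r : Int) (board : List Int) (L : List Int) :
    (L.countP (fun col => decide (¬ col = c ∧ PySem.List.pyGetD board col 0 = r)) : Int)
    + (L.countP (fun col => decide (¬ col = c ∧ PySem.List.pyGetD board col 0 - col = r - c)) : Int)
    + (L.countP (fun col => decide (¬ col = c ∧ PySem.List.pyGetD board col 0 + col = r + c)) : Int)
    = (L.countP (fun col =>
        decide (¬ col = c ∧ (PySem.List.pyGetD board col 0 = r ∨
          (r - PySem.List.pyGetD board col 0).natAbs = (c - col).natAbs))) : Int) := by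
  induction L with
  | nil => simp
  | cons x L ih =>
    simp only [List.countP_cons, decide_eq_true_eq]
    push_cast
    push_cast at ih
    split_ifs <;> omega

-- ===== VERDICT (by name: the statement is the Claim_ definition above) =====
theorem calc_conflicts_spec : Claim_equal_calc_conflicts := by
  intro c board n _hdom _hpre
  unfold Spec_calc_conflicts calc_conflicts calc_conflicts_alt
  simp only []
  rw [foldA_count]
  obtain ⟨h1, h2, h3⟩ := foldB_getD c board (PySem.List.pyRange 0 n 1)
    PySem.Dict.empty PySem.Dict.empty PySem.Dict.empty
    (PySem.List.pyGetD board c 0)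
    (PySem.List.pyGetD board c 0 - c)
    (PySem.List.pyGetD board c 0 + c)
  rw [h1, h2, h3]
  have hax := axes_split c (PySem.List.pyGetD board c 0) board (PySem.List.pyRange 0 n 1)
  simp only [PySem.Dict.getD_empty]
  omega
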